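-- pv_equiv track=rewrite | github.com/ArashPartow/qcalculator | src/python/qcalc/numberformat.py | remove_decimal_spaces
-- ===== SOURCE A (Python) =====
-- def remove_decimal_spaces(s):
--     size = len(s)
--     encountered_dot = False
--     ret = ""
--     i = 0
--     while i < size:
--         if s[i] == ".":
--             has_decimal = False
--             x = i + 1
--             while x < size:
--                 if s[x] != "0":
--                     has_decimal = True
--                     break
--                 x += 1
--             if not has_decimal:
--                 break
--             encountered_dot = True
--             ret = ret + s[i]
--         elif encountered_dot:
--             if s[i] == "0":
--                 x = i + 1
--                 last_zero = True
--                 while x < size: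
--                     if s[x] != "0":
--                         last_zero = False
--                         break
--                     x += 1
--                 if last_zero:
--                     break
--                 else:
--                     ret = ret + s[i]
--             else:
--                 ret = ret + s[i]
--         else:
--             ret = ret + s[i]
--         i += 1
--     return ret
-- ===== SOURCE B (Python) =====
-- def remove_decimal_spaces(s):
--     # Single backward scan finds z = start of the trailing all-'0' run,
--     # then the result is a slice of s decided by s[z-1] and one membership test.
--     z = len(s)
--     while z > 0 and s[z - 1] == "0":
--         z -= 1
--     if z == 0:
--         return s
--     if s[z - 1] == ".":
--         return s[:z - 1]
--     if "." in s[:z - 1]: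
--         return s[:z]
--     return s
-- ===== Notes on version B (the rewrite author's own statement) =====
-- stated objective: faster
-- what changed: Replaced the forward loop with an O(n) lookahead rescan at every '.' and '0' by one backward scan locating the start of the trailing all-zero run, then returning a slice chosen by the character before it and one membership test.
import Mathlib
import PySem

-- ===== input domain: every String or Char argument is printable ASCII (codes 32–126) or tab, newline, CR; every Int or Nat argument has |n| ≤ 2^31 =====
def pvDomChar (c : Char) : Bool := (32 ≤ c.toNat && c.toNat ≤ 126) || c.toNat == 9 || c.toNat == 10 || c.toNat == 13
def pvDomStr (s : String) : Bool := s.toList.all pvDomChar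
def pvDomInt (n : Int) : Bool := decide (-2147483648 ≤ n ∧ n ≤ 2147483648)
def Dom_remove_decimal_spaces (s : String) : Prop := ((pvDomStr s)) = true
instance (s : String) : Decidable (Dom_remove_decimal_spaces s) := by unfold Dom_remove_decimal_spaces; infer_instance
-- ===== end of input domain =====

-- B replaces A's quadratic forward loop (a full lookahead rescan at each '.'/'0')
-- by one backward scan for the trailing zero run plus a single slice: O(n).

-- ===== PORT A =====
-- A's inner while loops: scan s[x:] until a char ≠ '0' is found (has_decimal / ¬last_zero).
def pvHasNonzero : List Char → Bool
  | [] => false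
  | c :: rest => if c ≠ '0' then true else pvHasNonzero rest

-- A's outer while loop over i with state encountered_dot; 'break' returns [] (stops appending).
def pvLoopA (enc : Bool) : List Char → List Char
  | [] => []
  | c :: rest =>
    if c = '.' then
      if pvHasNonzero rest then c :: pvLoopA true rest else []
    else if enc then
      if c = '0' then
        if ¬ pvHasNonzero rest then [] else c :: pvLoopA enc rest
      else c :: pvLoopA enc rest
    else c :: pvLoopA enc rest

def remove_decimal_spaces (s : String) : String := String.ofList (pvLoopA false s.toList)

-- ===== PORT B =====
def remove_decimal_spaces_alt (s : String) : String :=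
  -- backward scan: drop the trailing run of '0's (r = reversed s[:z])
  let r := s.toList.reverse.dropWhile (fun c => c = '0')
  match r with
  | [] => s                                   -- z == 0
  | c :: r' =>
    if c = '.' then String.ofList r'.reverse      -- s[:z-1]
    else if r'.contains '.' then String.ofList (c :: r').reverse  -- '.' in s[:z-1] → s[:z]
    else s

-- ===== PRECONDITION & SPEC =====
def Spec_remove_decimal_spaces (s : String) (out : String) : Prop := out = remove_decimal_spaces_alt s
instance (s : String) (out : String) : Decidable (Spec_remove_decimal_spaces s out) := by unfold Spec_remove_decimal_spaces; infer_instance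

-- ===== CLAIM (what is proved, stated in full; the proofs are below) =====
def Claim_equal_remove_decimal_spaces : Prop := ∀ (s : String), Dom_remove_decimal_spaces s → Spec_remove_decimal_spaces s (remove_decimal_spaces s)

-- ===== LEMMAS AND PROOFS =====

-- list-level value of pvLoopA, phrased through the trailing-zero strip
def pvSpecL (enc : Bool) (cs : List Char) : List Char :=
  match cs.reverse.dropWhile (fun c => c = '0') with
  | [] => if enc then [] else cs
  | c :: r' =>
    if c = '.' then r'.reverse
    else if enc || r'.contains '.' then (c :: r').reverse
    else cs

theorem pvHasNonzero_iff (l : List Char) :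
    pvHasNonzero l = false ↔ l.reverse.dropWhile (fun c => c = '0') = [] := by
  induction l with
  | nil => simp [pvHasNonzero]
  | cons c t ih =>
    simp only [pvHasNonzero, List.reverse_cons, List.dropWhile_append]
    by_cases h : c = '0' <;>
      cases ht : t.reverse.dropWhile (fun c => c = '0') <;>
        simp_all [List.dropWhile]

theorem pvLoopA_eq_spec (cs : List Char) : ∀ enc, pvLoopA enc cs = pvSpecL enc cs := by
  induction cs with
  | nil => intro enc; simp [pvLoopA, pvSpecL]
  | cons c t ih =>
    intro enc
    by_cases hz : pvHasNonzero t = false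
    · -- t is all zeros: dropWhile of t.reverse is []
      have ht : t.reverse.dropWhile (fun c => c = '0') = [] := (pvHasNonzero_iff t).mp hz
      have htr : ∀ c ∈ t, c = '0' := by
        intro x hx
        have := List.dropWhile_eq_nil_iff.mp ht x (by simpa using hx)
        simpa using this
      simp only [pvSpecL, List.reverse_cons, List.dropWhile_append, ht, List.isEmpty_nil]
      by_cases hc0 : c = '0'
      · subst hc0
        simp only [pvLoopA, hz]
        have h1 : pvLoopA enc t = pvSpecL enc t := ih enc
        simp only [pvSpecL, ht] at h1
        by_cases he : enc <;> simp_all [List.dropWhile]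
      · by_cases hcd : c = '.'
        · subst hcd; simp [pvLoopA, hz, List.dropWhile]
        · have h1 : pvLoopA enc t = pvSpecL enc t := ih enc
          simp only [pvSpecL, ht] at h1
          by_cases he : enc <;>
            simp_all [pvLoopA, List.dropWhile]
    · -- t has a non-zero: dropWhile of t.reverse is d :: r''
      have hz' : pvHasNonzero t = true := by
        cases h : pvHasNonzero t
        · exact absurd h hz
        · rfl
      have ht : t.reverse.dropWhile (fun c => c = '0') ≠ [] := by
        intro h; exact hz ((pvHasNonzero_iff t).mpr h)
      obtain ⟨d, r'', hdr⟩ : ∃ d r'', t.reverse.dropWhile (fun c => c = '0') = d :: r'' := by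
        cases h : t.reverse.dropWhile (fun c => c = '0') with
        | nil => exact absurd h ht
        | cons d r'' => exact ⟨d, r'', rfl⟩
      have hspecT : ∀ e, pvSpecL e t =
          (if d = '.' then r''.reverse
           else if e || r''.contains '.' then (d :: r'').reverse else t) := by
        intro e; simp [pvSpecL, hdr]
      have hsteps : pvSpecL enc (c :: t) =
          (if d = '.' then (r'' ++ [c]).reverse
           else if enc || (r'' ++ [c]).contains '.' then (d :: (r'' ++ [c])).reverse else c :: t) := by
        simp [pvSpecL, List.dropWhile_append, hdr]
      by_cases hcd : c = '.'
      · subst hcd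
        have : pvLoopA enc ('.' :: t) = '.' :: pvLoopA true t := by
          simp [pvLoopA, hz']
        rw [this, ih true, hspecT true, hsteps]
        by_cases hd : d = '.' <;> simp [hd]
      · have hstep : pvLoopA enc (c :: t) = c :: pvLoopA enc t := by
          by_cases he : enc <;> by_cases hc0 : c = '0' <;>
            simp [pvLoopA, hcd, he, hc0, hz']
        rw [hstep, ih enc, hspecT enc, hsteps]
        have hmem : (r'' ++ [c]).contains '.' = r''.contains '.' := by
          simp [Ne.symm hcd]
        by_cases hd : d = '.'
        · simp [hd]
        · rw [hmem]
          by_cases hc : (enc || r''.contains '.') = true <;> simp_all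

-- ===== VERDICT (by name: the statement is the Claim_ definition above) =====
theorem remove_decimal_spaces_spec : Claim_equal_remove_decimal_spaces := by
  intro s _
  unfold Spec_remove_decimal_spaces remove_decimal_spaces remove_decimal_spaces_alt
  rw [pvLoopA_eq_spec s.toList false]
  simp only [pvSpecL]
  cases h : s.toList.reverse.dropWhile (fun c => c = '0') with
  | nil => simp
  | cons c r' =>
    by_cases hc : c = '.'
    · simp [hc]
    · by_cases hm : '.' ∈ r' <;> simp [hc, hm]
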